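-- pv_equiv track=rewrite | github.com/Ash210611/rulesenigne | un_re/split_name_parts.py | merge_compound_mixed_parts
-- ===== SOURCE A (Python) =====
-- from typing import List
--
-- def merge_compound_mixed_parts(part_list: List[str]):
--     '''
--     Merge specified tokens that should be recognized as compound names
--
--     For example,
--         Input	: ['Report', 'Year', 'Month']
--         Output	: ['Report', 'YearMonth']
--
--     For example,
--         Input	: ['Account', 'Experience', 'Beginning', 'Year', 'Month']
--         Output	: ['Account', 'Experience', 'Beginning', 'YearMonth']
--     '''
--
--     new_part_list = []
--     num_parts = len(part_list)
--
--     n = 0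
--     while n < num_parts:
--         if part_list[n] == 'Year':
--             if n < num_parts - 1:
--                 if part_list[n + 1] == 'Month':
--                     new_part_list.append('YearMonth')
--                     # Skip this token
--                     n += 1
--                 else:
--                     new_part_list.append('Year')
--             else:
--                 new_part_list.append('Year')
--         else:
--             new_part_list.append(part_list[n])
--         n += 1
--
--     return new_part_list
-- ===== SOURCE B (Python) =====
-- from typing import List
--
-- def merge_compound_mixed_parts(part_list: List[str]):
--     '''Merge adjacent 'Year','Month' tokens into a single 'YearMonth' token.'''
--     out = []
--     for tok in part_list:
--         if tok == 'Month' and out and out[-1] == 'Year':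
--             out[-1] = 'YearMonth'
--         else:
--             out.append(tok)
--     return out
-- ===== Notes on version B (the rewrite author's own statement) =====
-- stated objective: simpler
-- what changed: Replaced the index-walking while loop with lookahead at part_list[n+1] and skip bookkeeping by a single forward for-loop that looks backward: when the current token is 'Month' and the last emitted token is 'Year', the last output entry is rewritten to 'YearMonth'.
import Mathlib
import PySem

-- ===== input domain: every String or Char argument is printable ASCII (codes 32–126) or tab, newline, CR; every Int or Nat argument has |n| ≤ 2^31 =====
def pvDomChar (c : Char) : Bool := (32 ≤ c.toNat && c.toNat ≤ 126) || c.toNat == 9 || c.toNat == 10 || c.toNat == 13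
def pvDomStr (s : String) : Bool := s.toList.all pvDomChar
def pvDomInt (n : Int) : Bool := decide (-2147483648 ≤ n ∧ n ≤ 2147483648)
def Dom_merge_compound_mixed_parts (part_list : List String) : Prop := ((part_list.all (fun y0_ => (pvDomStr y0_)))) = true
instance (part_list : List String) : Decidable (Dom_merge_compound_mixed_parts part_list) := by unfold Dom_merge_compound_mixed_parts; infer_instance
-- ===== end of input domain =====

-- B replaces A's index-walking while loop with lookahead and skip bookkeeping by a single
-- forward pass that rewrites the last emitted token when 'Month' follows 'Year' (simpler).


-- ===== PORT A =====
-- while loop of A: recursion on n with state (n, new_part_list); indices are always in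
-- range, so List.getD is exact for Python's part_list[n] here
def mergeLoopA (part_list : List String) (num_parts : Nat) (n : Nat)
    (new_part_list : List String) : List String :=
  if _h : n < num_parts then
    if part_list.getD n "" = "Year" then
      if n < num_parts - 1 then
        if part_list.getD (n + 1) "" = "Month" then
          mergeLoopA part_list num_parts (n + 2) (new_part_list ++ ["YearMonth"])
        else
          mergeLoopA part_list num_parts (n + 1) (new_part_list ++ ["Year"])
      else
        mergeLoopA part_list num_parts (n + 1) (new_part_list ++ ["Year"])
    else
      mergeLoopA part_list num_parts (n + 1) (new_part_list ++ [part_list.getD n ""])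
  else new_part_list
termination_by num_parts - n

def merge_compound_mixed_parts (part_list : List String) : List String :=
  mergeLoopA part_list part_list.length 0 []

-- ===== PORT B =====
-- out[-1] read/overwrite ported as getLast? / dropLast ++ [...]
def stepB (out : List String) (tok : String) : List String :=
  if tok = "Month" ∧ out.getLast? = some "Year" then
    out.dropLast ++ ["YearMonth"]
  else out ++ [tok]

def merge_compound_mixed_parts_alt (part_list : List String) : List String :=
  part_list.foldl stepB []

-- ===== PRECONDITION & SPEC =====
def Spec_merge_compound_mixed_parts (part_list : List String) (out : List String) : Prop := out = merge_compound_mixed_parts_alt part_list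
instance (part_list : List String) (out : List String) : Decidable (Spec_merge_compound_mixed_parts part_list out) := by unfold Spec_merge_compound_mixed_parts; infer_instance

-- ===== CLAIM (what is proved, stated in full; the proofs are below) =====
def Claim_equal_merge_compound_mixed_parts : Prop := ∀ (part_list : List String), Dom_merge_compound_mixed_parts part_list → Spec_merge_compound_mixed_parts part_list (merge_compound_mixed_parts part_list)

-- ===== LEMMAS AND PROOFS =====

-- proof-only specification: structural recursion both ports are shown equal to
def mergeRec : List String → List String
  | [] => []
  | [p] => [p]
  | p :: q :: rest =>
    if p = "Year" ∧ q = "Month" then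
      "YearMonth" :: mergeRec rest
    else
      p :: mergeRec (q :: rest)

lemma alt_cons_not_year (p : String) (rest : List String) (hp : p ≠ "Year") :
    mergeRec (p :: rest) = p :: mergeRec rest := by
  cases rest with
  | nil => simp [mergeRec]
  | cons q r => simp [mergeRec, hp]

lemma alt_cons_not_month (p q : String) (rest : List String) (hq : q ≠ "Month") :
    mergeRec (p :: q :: rest) = p :: mergeRec (q :: rest) := by
  simp [mergeRec, hq]

lemma foldB_eq : ∀ (fuel : Nat) (xs acc : List String), xs.length ≤ fuel →
    (acc.getLast? = some "Year" → xs.head? ≠ some "Month") →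
    xs.foldl stepB acc = acc ++ mergeRec xs := by
  intro fuel
  induction fuel with
  | zero =>
    intro xs acc h _
    have : xs = [] := List.eq_nil_of_length_eq_zero (by omega)
    simp [this, mergeRec]
  | succ fuel ih =>
    intro xs acc h hguard
    cases xs with
    | nil => simp [mergeRec]
    | cons x rest =>
      by_cases hx : x = "Month"
      · have hlast : acc.getLast? ≠ some "Year" := fun hl => hguard hl (by simp [hx])
        have hstep : stepB acc x = acc ++ ["Month"] := by
          simp [stepB, hx, hlast]
        rw [List.foldl_cons, hstep,
            ih rest _ (by simpa using Nat.le_of_succ_le_succ h)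
              (by simp),
            alt_cons_not_year _ _ (by simp [hx]), hx]
        simp
      · have hstep : stepB acc x = acc ++ [x] := by simp [stepB, hx]
        rw [List.foldl_cons, hstep]
        by_cases hy : x = "Year"
        · cases rest with
          | nil => simp [hy, mergeRec]
          | cons q rest2 =>
            by_cases hq : q = "Month"
            · have hstep2 : stepB (acc ++ [x]) q = acc ++ ["YearMonth"] := by
                simp [stepB, hq, hy]
              rw [List.foldl_cons, hstep2,
                  ih rest2 _ (by simp at h ⊢; omega)
                    (by simp),
                  hy, hq]
              simp [mergeRec]
            · rw [ih (q :: rest2) _ (by simpa using Nat.le_of_succ_le_succ h)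
                    (by simp [hq]),
                  hy, alt_cons_not_month _ _ _ hq]
              simp
        · rw [ih rest _ (by simpa using Nat.le_of_succ_le_succ h)
                (by simp [hy]),
              alt_cons_not_year _ _ hy]
          simp

lemma mergeLoopA_eq (xs : List String) :
    ∀ (fuel n : Nat) (acc : List String), xs.length - n ≤ fuel →
      mergeLoopA xs xs.length n acc = acc ++ mergeRec (xs.drop n) := by
  intro fuel
  induction fuel with
  | zero =>
    intro n acc h
    have hn : xs.length ≤ n := by omega
    rw [mergeLoopA]
    simp [Nat.not_lt.mpr hn, List.drop_eq_nil_of_le hn, mergeRec]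
  | succ fuel ih =>
    intro n acc h
    rw [mergeLoopA]
    by_cases hn : n < xs.length
    · have hget : xs.getD n "" = xs[n] := List.getD_eq_getElem xs "" hn
      have hdrop : xs.drop n = xs[n] :: xs.drop (n + 1) := List.drop_eq_getElem_cons hn
      simp only [hn, hget]
      by_cases hy : xs[n] = "Year"
      · simp only [hy]
        by_cases hlt : n < xs.length - 1
        · have hn1 : n + 1 < xs.length := by omega
          have hget1 : xs.getD (n + 1) "" = xs[n + 1] := List.getD_eq_getElem xs "" hn1
          have hdrop1 : xs.drop (n + 1) = xs[n + 1] :: xs.drop (n + 2) :=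
            List.drop_eq_getElem_cons hn1
          simp only [if_pos hlt, hget1]
          by_cases hm : xs[n + 1] = "Month"
          · rw [if_pos hm, ih _ _ (by omega), hdrop, hdrop1, hy, hm]
            simp [mergeRec]
          · rw [if_neg hm, ih _ _ (by omega), hdrop, hdrop1, hy,
                alt_cons_not_month _ _ _ hm, ← hdrop1]
            simp
        · have hend : xs.length ≤ n + 1 := by omega
          rw [if_neg hlt, ih _ _ (by omega), hdrop, hy,
              List.drop_eq_nil_of_le hend]
          simp [mergeRec]
      · rw [if_neg hy, ih _ _ (by omega), hdrop, alt_cons_not_year _ _ hy]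
        simp
    · simp only [dif_neg hn]
      have hge : xs.length ≤ n := Nat.not_lt.mp hn
      rw [List.drop_eq_nil_of_le hge]
      simp [mergeRec]

-- ===== VERDICT (by name: the statement is the Claim_ definition above) =====
theorem merge_compound_mixed_parts_spec : Claim_equal_merge_compound_mixed_parts := by
  intro part_list _
  unfold Spec_merge_compound_mixed_parts merge_compound_mixed_parts
    merge_compound_mixed_parts_alt
  rw [mergeLoopA_eq part_list part_list.length 0 [] (by omega),
      foldB_eq part_list.length part_list [] (le_refl _) (by simp)]
  simp
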